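-- pv_equiv track=rewrite | github.com/gerrard088/Truck-Platoon-2 | truck_control/truck_control/lane_detect.py | select_strategic_lanes
-- ===== SOURCE A (Python) =====
-- def select_strategic_lanes(all_lane_centers, img_width):
--     if len(all_lane_centers) < 2:
--         return None, None, None, None, []
--     mid = img_width // 2
--     left_lanes = sorted([x for x in all_lane_centers if x < mid], reverse=True)
--     right_lanes = sorted([x for x in all_lane_centers if x > mid])
--     if not left_lanes or not right_lanes:
--         return None, None, None, None, []
--     center_left = left_lanes[0]
--     center_right = right_lanes[0]
--     adj_left = left_lanes[1] if len(left_lanes) > 1 else None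
--     adj_right = right_lanes[1] if len(right_lanes) > 1 else None
--     return center_left, center_right, adj_left, adj_right, sorted(left_lanes + right_lanes)
-- ===== SOURCE B (Python) =====
-- def select_strategic_lanes(all_lane_centers, img_width):
--     if len(all_lane_centers) < 2:
--         return None, None, None, None, []
--     mid = img_width // 2
--     l1 = l2 = r1 = r2 = None
--     for x in all_lane_centers:
--         if x < mid:
--             if l1 is None or x >= l1:
--                 l1, l2 = x, l1
--             elif l2 is None or x > l2:
--                 l2 = x
--         elif x > mid:
--             if r1 is None or x <= r1:
--                 r1, r2 = x, r1
--             elif r2 is None or x < r2: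
--                 r2 = x
--     if l1 is None or r1 is None:
--         return None, None, None, None, []
--     return l1, r1, l2, r2, sorted(x for x in all_lane_centers if x != mid)
-- ===== Notes on version B (the rewrite author's own statement) =====
-- stated objective: alternative
-- what changed: B replaces A's sorting-based selection (two filtered sorts read at indices 0 and 1) with a single linear pass that maintains the top-two candidates on each side of the midpoint in four accumulators; only the returned list is produced by one sort.
import Mathlib
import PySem

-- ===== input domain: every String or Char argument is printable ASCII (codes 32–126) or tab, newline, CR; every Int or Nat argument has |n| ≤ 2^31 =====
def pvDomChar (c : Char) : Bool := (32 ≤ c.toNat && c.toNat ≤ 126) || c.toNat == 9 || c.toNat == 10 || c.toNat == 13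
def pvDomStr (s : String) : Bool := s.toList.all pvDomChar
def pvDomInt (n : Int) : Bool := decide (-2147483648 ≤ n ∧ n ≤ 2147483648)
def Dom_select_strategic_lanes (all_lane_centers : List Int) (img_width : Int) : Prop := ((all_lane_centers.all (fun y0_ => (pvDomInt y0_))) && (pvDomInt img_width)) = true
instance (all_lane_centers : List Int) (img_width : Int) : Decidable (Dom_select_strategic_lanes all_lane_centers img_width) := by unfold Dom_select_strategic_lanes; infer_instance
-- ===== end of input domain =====

-- B replaces A's sorting-based selection with one linear pass keeping the top-two candidates on each side of the midpoint; only the returned list is sorted (alternative decomposition, return value only).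


-- ===== PORT A =====
def select_strategic_lanes (all_lane_centers : List Int) (img_width : Int) : Option Int × Option Int × Option Int × Option Int × List Int :=
  if all_lane_centers.length < 2 then (none, none, none, none, [])
  else
    let mid := PySem.Int.floordiv img_width 2
    let left_lanes := PySem.List.sorted (all_lane_centers.filter (fun x => x < mid)) (fun x => x) true
    let right_lanes := PySem.List.sorted (all_lane_centers.filter (fun x => mid < x)) (fun x => x) false
    if left_lanes.isEmpty || right_lanes.isEmpty then (none, none, none, none, [])
    else
      (left_lanes.head?, right_lanes.head?,
       if 1 < left_lanes.length then left_lanes[1]? else none,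
       if 1 < right_lanes.length then right_lanes[1]? else none,
       PySem.List.sorted (left_lanes ++ right_lanes) (fun x => x) false)

-- ===== PORT B =====
-- 'if l1 is None or x >= l1: l1,l2 = x,l1  elif l2 is None or x > l2: l2 = x'
def pvStepL (l1 l2 : Option Int) (x : Int) : Option Int × Option Int :=
  match l1 with
  | none => (some x, l1)
  | some a =>
    if a ≤ x then (some x, l1)
    else match l2 with
      | none => (l1, some x)
      | some b => if b < x then (l1, some x) else (l1, l2)

-- 'if r1 is None or x <= r1: r1,r2 = x,r1  elif r2 is None or x < r2: r2 = x'
def pvStepR (r1 r2 : Option Int) (x : Int) : Option Int × Option Int :=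
  match r1 with
  | none => (some x, r1)
  | some a =>
    if x ≤ a then (some x, r1)
    else match r2 with
      | none => (r1, some x)
      | some b => if x < b then (r1, some x) else (r1, r2)

def select_strategic_lanes_alt (all_lane_centers : List Int) (img_width : Int) : Option Int × Option Int × Option Int × Option Int × List Int :=
  if all_lane_centers.length < 2 then (none, none, none, none, [])
  else
    let mid := PySem.Int.floordiv img_width 2
    let st := all_lane_centers.foldl
      (fun (s : (Option Int × Option Int) × (Option Int × Option Int)) x =>
        if x < mid then (pvStepL s.1.1 s.1.2 x, s.2)
        else if mid < x then (s.1, pvStepR s.2.1 s.2.2 x)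
        else s)
      ((none, none), (none, none))
    match st.1.1, st.2.1 with
    | some a, some b =>
        (some a, some b, st.1.2, st.2.2,
         PySem.List.sorted (all_lane_centers.filter (fun x => x ≠ mid)) (fun x => x) false)
    | _, _ => (none, none, none, none, [])

-- ===== PRECONDITION & SPEC =====
def Spec_select_strategic_lanes (all_lane_centers : List Int) (img_width : Int) (out : Option Int × Option Int × Option Int × Option Int × List Int) : Prop := out = select_strategic_lanes_alt all_lane_centers img_width
instance (all_lane_centers : List Int) (img_width : Int) (out : Option Int × Option Int × Option Int × Option Int × List Int) : Decidable (Spec_select_strategic_lanes all_lane_centers img_width out) := by unfold Spec_select_strategic_lanes; infer_instance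

-- ===== CLAIM (what is proved, stated in full; the proofs are below) =====
def Claim_equal_select_strategic_lanes : Prop := ∀ (all_lane_centers : List Int) (img_width : Int), Dom_select_strategic_lanes all_lane_centers img_width → Spec_select_strategic_lanes all_lane_centers img_width (select_strategic_lanes all_lane_centers img_width)

-- ===== LEMMAS AND PROOFS =====

-- ordered insert into a descending list / an ascending list
def pvDIns (x : Int) : List Int → List Int
  | [] => [x]
  | a :: t => if a ≤ x then x :: a :: t else a :: pvDIns x t

def pvAIns (x : Int) : List Int → List Int
  | [] => [x]
  | a :: t => if x ≤ a then x :: a :: t else a :: pvAIns x t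

theorem pvDIns_perm (x : Int) (l : List Int) : (pvDIns x l).Perm (x :: l) := by
  induction l with
  | nil => simp [pvDIns]
  | cons a t ih =>
    by_cases h : a ≤ x
    · simp [pvDIns, h]
    · simpa [pvDIns, h] using (ih.cons a).trans (List.Perm.swap x a t)

theorem pvAIns_perm (x : Int) (l : List Int) : (pvAIns x l).Perm (x :: l) := by
  induction l with
  | nil => simp [pvAIns]
  | cons a t ih =>
    by_cases h : x ≤ a
    · simp [pvAIns, h]
    · simpa [pvAIns, h] using (ih.cons a).trans (List.Perm.swap x a t)

theorem pvDIns_pairwise (x : Int) (l : List Int) (h : l.Pairwise (fun a b => b ≤ a)) :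
    (pvDIns x l).Pairwise (fun a b => b ≤ a) := by
  induction l with
  | nil => simp [pvDIns]
  | cons a t ih =>
    rcases List.pairwise_cons.mp h with ⟨ha, ht⟩
    by_cases hax : a ≤ x
    · simp only [pvDIns, hax, if_pos]
      refine List.pairwise_cons.mpr ⟨?_, h⟩
      intro b hb
      rcases List.mem_cons.mp hb with rfl | hb'
      · exact hax
      · exact le_trans (ha b hb') hax
    · simp only [pvDIns, hax, if_neg, not_false_iff]
      refine List.pairwise_cons.mpr ⟨?_, ih ht⟩
      intro b hb
      rcases List.mem_cons.mp (((pvDIns_perm x t).mem_iff).mp hb) with heq | hm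
      · omega
      · exact ha b hm

theorem pvAIns_pairwise (x : Int) (l : List Int) (h : l.Pairwise (fun a b => a ≤ b)) :
    (pvAIns x l).Pairwise (fun a b => a ≤ b) := by
  induction l with
  | nil => simp [pvAIns]
  | cons a t ih =>
    rcases List.pairwise_cons.mp h with ⟨ha, ht⟩
    by_cases hax : x ≤ a
    · simp only [pvAIns, hax, if_pos]
      refine List.pairwise_cons.mpr ⟨?_, h⟩
      intro b hb
      rcases List.mem_cons.mp hb with rfl | hb'
      · exact hax
      · exact le_trans hax (ha b hb')
    · simp only [pvAIns, hax, if_neg, not_false_iff]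
      refine List.pairwise_cons.mpr ⟨?_, ih ht⟩
      intro b hb
      rcases List.mem_cons.mp (((pvAIns_perm x t).mem_iff).mp hb) with heq | hm
      · omega
      · exact ha b hm

-- appending one element to the input inserts it into the ascending sort
theorem pv_asort_snoc (ys : List Int) (x : Int) :
    PySem.List.sorted (ys ++ [x]) (fun v => v) false = pvAIns x (PySem.List.sorted ys (fun v => v) false) := by
  have hperm : (PySem.List.sorted (ys ++ [x]) (fun v => v) false).Perm
      (pvAIns x (PySem.List.sorted ys (fun v => v) false)) := by
    refine (PySem.List.sorted_perm _ _ _).trans ?_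
    refine ((List.perm_append_singleton x ys).trans ?_).trans (pvAIns_perm x _).symm
    exact ((PySem.List.sorted_perm ys (fun v => v) false).symm).cons x
  exact PySem.List.eq_of_perm_of_pairwise_le_of_injective (fun v : Int => v)
    (fun a b h => h) hperm
    (PySem.List.sorted_pairwise _ _)
    (pvAIns_pairwise x _ (PySem.List.sorted_pairwise _ _))

-- appending one element to the input inserts it into the descending sort
theorem pv_dsort_snoc (ys : List Int) (x : Int) :
    PySem.List.sorted (ys ++ [x]) (fun v => v) true = pvDIns x (PySem.List.sorted ys (fun v => v) true) := by
  have hperm : ((PySem.List.sorted (ys ++ [x]) (fun v => v) true).map (fun v => -v)).Perm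
      ((pvDIns x (PySem.List.sorted ys (fun v => v) true)).map (fun v => -v)) := by
    refine List.Perm.map _ ?_
    refine (PySem.List.sorted_perm _ _ _).trans ?_
    refine ((List.perm_append_singleton x ys).trans ?_).trans (pvDIns_perm x _).symm
    exact ((PySem.List.sorted_perm ys (fun v => v) true).symm).cons x
  have h1 : ((PySem.List.sorted (ys ++ [x]) (fun v => v) true).map (fun v => -v)).Pairwise
      (fun a b : Int => a ≤ b) := by
    rw [List.pairwise_map]
    exact (PySem.List.sorted_pairwise_rev _ _).imp (by intro a b h; omega)
  have h2 : ((pvDIns x (PySem.List.sorted ys (fun v => v) true)).map (fun v => -v)).Pairwise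
      (fun a b : Int => a ≤ b) := by
    rw [List.pairwise_map]
    exact (pvDIns_pairwise x _ (PySem.List.sorted_pairwise_rev _ _)).imp (by intro a b h; omega)
  have hmap := PySem.List.eq_of_perm_of_pairwise_le_of_injective (fun v : Int => v)
    (fun a b h => h) hperm h1 h2
  have hinj : Function.Injective (fun v : Int => -v) := fun a b h => by
    simpa using congrArg (fun v : Int => -v) h
  exact List.map_injective_iff.mpr hinj hmap

-- the Python conditional update reads off the first two entries of the inserted list
theorem pvStepL_spec (x : Int) (l : List Int) :
    pvStepL l.head? l[1]? x = ((pvDIns x l).head?, (pvDIns x l)[1]?) := by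
  match l with
  | [] => simp [pvStepL, pvDIns]
  | [a] =>
    by_cases h : a ≤ x <;> simp [pvStepL, pvDIns, h]
  | a :: b :: t =>
    by_cases h1 : a ≤ x
    · simp [pvStepL, pvDIns, h1]
    · by_cases h2 : b ≤ x
      · have : ¬ b < x ∨ b < x := by omega
        by_cases h3 : b < x
        · simp [pvStepL, pvDIns, h1, h2, h3]
        · have hbx : b = x := by omega
          subst hbx
          simp [pvStepL, pvDIns, h1]
      · have h3 : ¬ b < x := by omega
        simp [pvStepL, pvDIns, h1, h2, h3]

theorem pvStepR_spec (x : Int) (l : List Int) :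
    pvStepR l.head? l[1]? x = ((pvAIns x l).head?, (pvAIns x l)[1]?) := by
  match l with
  | [] => simp [pvStepR, pvAIns]
  | [a] =>
    by_cases h : x ≤ a <;> simp [pvStepR, pvAIns, h]
  | a :: b :: t =>
    by_cases h1 : x ≤ a
    · simp [pvStepR, pvAIns, h1]
    · by_cases h2 : x ≤ b
      · by_cases h3 : x < b
        · simp [pvStepR, pvAIns, h1, h2, h3]
        · have hbx : x = b := by omega
          subst hbx
          simp [pvStepR, pvAIns, h1]
      · have h3 : ¬ x < b := by omega
        simp [pvStepR, pvAIns, h1, h2, h3]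

-- the two first entries of the sorted halves, as a fold state
def pvEnc (mid : Int) (p : List Int) : (Option Int × Option Int) × (Option Int × Option Int) :=
  (((PySem.List.sorted (p.filter (fun x => x < mid)) (fun v => v) true).head?,
    (PySem.List.sorted (p.filter (fun x => x < mid)) (fun v => v) true)[1]?),
   ((PySem.List.sorted (p.filter (fun x => mid < x)) (fun v => v) false).head?,
    (PySem.List.sorted (p.filter (fun x => mid < x)) (fun v => v) false)[1]?))

theorem pv_fold_inv (mid : Int) (xs : List Int) : ∀ (p : List Int),
    xs.foldl (fun (s : (Option Int × Option Int) × (Option Int × Option Int)) x =>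
        if x < mid then (pvStepL s.1.1 s.1.2 x, s.2)
        else if mid < x then (s.1, pvStepR s.2.1 s.2.2 x)
        else s) (pvEnc mid p)
    = pvEnc mid (p ++ xs) := by
  induction xs with
  | nil => intro p; simp
  | cons x t ih =>
    intro p
    have hstep : (if x < mid then (pvStepL (pvEnc mid p).1.1 (pvEnc mid p).1.2 x, (pvEnc mid p).2)
        else if mid < x then ((pvEnc mid p).1, pvStepR (pvEnc mid p).2.1 (pvEnc mid p).2.2 x)
        else (pvEnc mid p)) = pvEnc mid (p ++ [x]) := by
      rcases lt_trichotomy x mid with h | h | h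
      · have hlf : (p ++ [x]).filter (fun v => decide (v < mid)) = p.filter (fun v => decide (v < mid)) ++ [x] := by
          simp [List.filter_append, h]
        have hrf : (p ++ [x]).filter (fun v => decide (mid < v)) = p.filter (fun v => decide (mid < v)) := by
          simp [List.filter_append, (show ¬ mid < x by omega)]
        simp only [pvEnc, h, if_pos, hlf, hrf, pv_dsort_snoc, pvStepL_spec]
      · have hlf : (p ++ [x]).filter (fun v => decide (v < mid)) = p.filter (fun v => decide (v < mid)) := by
          simp [List.filter_append, (show ¬ x < mid by omega)]
        have hrf : (p ++ [x]).filter (fun v => decide (mid < v)) = p.filter (fun v => decide (mid < v)) := by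
          simp [List.filter_append, (show ¬ mid < x by omega)]
        simp only [pvEnc, (show ¬ x < mid by omega), (show ¬ mid < x by omega), if_neg, not_false_iff, hlf, hrf]
      · have hlf : (p ++ [x]).filter (fun v => decide (v < mid)) = p.filter (fun v => decide (v < mid)) := by
          simp [List.filter_append, (show ¬ x < mid by omega)]
        have hrf : (p ++ [x]).filter (fun v => decide (mid < v)) = p.filter (fun v => decide (mid < v)) ++ [x] := by
          simp [List.filter_append, h]
        simp only [pvEnc, (show ¬ x < mid by omega), h, if_pos, if_neg, not_false_iff, hlf, hrf, pv_asort_snoc, pvStepR_spec]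
    calc (x :: t).foldl _ (pvEnc mid p) = t.foldl _ (pvEnc mid (p ++ [x])) := by
          rw [List.foldl_cons, hstep]
      _ = pvEnc mid ((p ++ [x]) ++ t) := ih (p ++ [x])
      _ = pvEnc mid (p ++ x :: t) := by rw [List.append_assoc]; rfl

-- The two filtered halves, concatenated, are a permutation of the non-mid filter.
theorem pv_filter_split_perm (xs : List Int) (mid : Int) :
    (xs.filter (fun x => decide (x < mid)) ++ xs.filter (fun x => decide (mid < x))).Perm
      (xs.filter (fun x => decide (x ≠ mid))) := by
  induction xs with
  | nil => simp
  | cons a t ih =>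
    rcases lt_trichotomy a mid with h | h | h
    · simpa [List.filter_cons, h, (show ¬ mid < a by omega), (show ¬ a = mid by omega)]
        using ih.cons a
    · simpa [List.filter_cons, (show ¬ a < mid by omega), (show ¬ mid < a by omega), h]
        using ih
    · simpa [List.filter_cons, (show ¬ a < mid by omega), h, (show ¬ a = mid by omega)]
        using List.perm_middle.trans (ih.cons a)

-- descending sort (key = id) is the reverse of the ascending sort
theorem pv_sorted_rev_eq_reverse (xs : List Int) :
    PySem.List.sorted xs (fun x => x) true = (PySem.List.sorted xs (fun x => x) false).reverse := by
  have h1 : ((PySem.List.sorted xs (fun x => x) true).reverse).Perm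
      (PySem.List.sorted xs (fun x => x) false) :=
    ((List.reverse_perm _).trans (PySem.List.sorted_perm xs _ true)).trans
      (PySem.List.sorted_perm xs _ false).symm
  have h2 : ((PySem.List.sorted xs (fun x => x) true).reverse).Pairwise (fun a b => a ≤ b) := by
    rw [List.pairwise_reverse]
    exact PySem.List.sorted_pairwise_rev xs (fun x => x)
  have h3 := PySem.List.eq_of_perm_of_pairwise_le_of_injective (fun x : Int => x)
    (fun a b h => h) h1 h2 (PySem.List.sorted_pairwise xs (fun x => x))
  calc PySem.List.sorted xs (fun x => x) true
      = ((PySem.List.sorted xs (fun x => x) true).reverse).reverse := by simp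
    _ = (PySem.List.sorted xs (fun x => x) false).reverse := by rw [h3]

theorem pv_if_get1 (l : List Int) : (if 1 < l.length then l[1]? else none) = l[1]? := by
  split
  · rfl
  · match l with
    | [] => rfl
    | [a] => rfl
    | a :: b :: t => next h => simp at h

theorem pv_main (xs : List Int) (w : Int) :
    select_strategic_lanes xs w = select_strategic_lanes_alt xs w := by
  unfold select_strategic_lanes select_strategic_lanes_alt
  by_cases hlen : xs.length < 2
  · simp [hlen]
  · simp only [hlen, if_false]
    set mid := PySem.Int.floordiv w 2 with hmid
    set LL := PySem.List.sorted (xs.filter (fun x => x < mid)) (fun v => v) true with hLL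
    set R := PySem.List.sorted (xs.filter (fun x => mid < x)) (fun v => v) false with hR
    have hfold : xs.foldl (fun (s : (Option Int × Option Int) × (Option Int × Option Int)) x =>
        if x < mid then (pvStepL s.1.1 s.1.2 x, s.2)
        else if mid < x then (s.1, pvStepR s.2.1 s.2.2 x)
        else s) ((none, none), (none, none))
        = ((LL.head?, LL[1]?), (R.head?, R[1]?)) := by
      have h0 : pvEnc mid ([] : List Int) = ((none, none), (none, none)) := by
        simp [pvEnc, PySem.List.sorted]
      rw [← h0, pv_fold_inv mid xs []]
      simp [pvEnc, hLL, hR]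
    rw [hfold]
    -- combined list equality
    have hrev : LL = (PySem.List.sorted (xs.filter (fun x => x < mid)) (fun v => v) false).reverse :=
      pv_sorted_rev_eq_reverse _
    set L := PySem.List.sorted (xs.filter (fun x => x < mid)) (fun v => v) false with hLdef
    have hmemL : ∀ a ∈ L, a < mid := by
      intro a ha
      have := (PySem.List.mem_sorted (xs := xs.filter (fun x => x < mid))
        (key := fun v => v) (rev := false) (x := a)).mp ha
      simpa using (List.mem_filter.mp this).2
    have hmemR : ∀ a ∈ R, mid < a := by
      intro a ha
      have := (PySem.List.mem_sorted (xs := xs.filter (fun x => mid < x))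
        (key := fun v => v) (rev := false) (x := a)).mp ha
      simpa using (List.mem_filter.mp this).2
    have hLRpair : (L ++ R).Pairwise (fun a b : Int => a ≤ b) := by
      rw [List.pairwise_append]
      refine ⟨PySem.List.sorted_pairwise _ _, PySem.List.sorted_pairwise _ _, ?_⟩
      intro a ha b hb
      have := hmemL a ha; have := hmemR b hb; omega
    have hLRperm : (L ++ R).Perm (xs.filter (fun x => x ≠ mid)) := by
      refine (List.Perm.append (PySem.List.sorted_perm _ _ _) (PySem.List.sorted_perm _ _ _)).trans ?_
      simpa using pv_filter_split_perm xs mid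
    have hC : PySem.List.sorted (xs.filter (fun x => x ≠ mid)) (fun v => v) false = L ++ R :=
      PySem.List.sorted_id_eq_of_perm_of_pairwise _ _ hLRperm hLRpair
    have hfin : PySem.List.sorted (LL ++ R) (fun v => v) false = L ++ R := by
      rw [hrev]
      exact PySem.List.sorted_id_eq_of_perm_of_pairwise _ _
        (List.Perm.append (List.reverse_perm L).symm (List.Perm.refl R)) hLRpair
    -- case analysis on emptiness
    match hLLe : LL, hRe : R with
    | [], _ => simp
    | a :: t, [] => simp
    | a :: t, b :: u =>
      simp only [List.isEmpty_cons, Bool.or_self, Bool.false_eq_true, if_false,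
        List.head?_cons]
      rw [pv_if_get1, pv_if_get1, hfin, hC]

-- ===== VERDICT (by name: the statement is the Claim_ definition above) =====
theorem select_strategic_lanes_spec : Claim_equal_select_strategic_lanes := by
  intro xs w _
  unfold Spec_select_strategic_lanes
  exact pv_main xs w
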